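-- pv_equiv track=rewrite | github.com/prof7bit/mlstools | mlstools.py | generate_mls
-- ===== SOURCE A (Python) =====
-- def poly_degree(poly):
--     """Return the degree of the polynomial"""
--     l = -1
--     while poly:
--         poly >>= 1
--         l += 1
--     return l
--
-- def mls_length_from_poly(poly):
--     """Return the period length of the generated mls.
--     This function does NOT check whether it really is
--     a primitive polynomial, it will just calculate
--     how long such an MLS would be."""
--     return (2 ** poly_degree(poly)) - 1
--
-- def generate_mls(poly):
--     """Implement the LFSR and return a list containing
--     one period of the generated MLS with elements consisting
--     of 1 or 0. This function will not check whether the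
--     polynomial is really primitive, it will just blindly
--     assume it is."""
--     deg = poly_degree(poly)
--     length = mls_length_from_poly(poly)
--     register = [1] * deg
--     mls = []
--
--     # make a list of taps
--     taps = []
--     n = 1
--     poly >>= 1
--     while poly > 1:
--         if poly & 1:
--             taps.append(n)
--         poly >>= 1
--         n += 1
--
--     # iterate over the expected output length while
--     # performing the feedback and the register rotation
--     for i in range(length):
--         feedback = register[0]
--         for tap in taps:
--             feedback ^= register[tap]
--         register.append(feedback)
--         mls.append(register.pop(0))
--
--     return mls
-- ===== SOURCE B (Python) =====
-- def generate_mls(poly):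
--     """LFSR MLS generation with the register held in a single integer:
--     output = state & 1, feedback = parity of state & mask, new bit goes
--     to position deg-1."""
--     deg = poly.bit_length() - 1
--     mask = (poly & ((1 << deg) - 1)) | 1
--     state = (1 << deg) - 1
--     mls = []
--     for _ in range((1 << deg) - 1):
--         mls.append(state & 1)
--         fb = bin(state & mask).count('1') & 1
--         state = (state >> 1) | (fb << (deg - 1))
--     return mls
-- ===== Notes on version B (the rewrite author's own statement) =====
-- stated objective: idiomatic
-- what changed: The shift register becomes a single integer with a precomputed feedback mask: output is state & 1 and feedback is the parity of state & mask, replacing A's explicit bit list, tap list and per-step list append/pop rotation.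
import Mathlib
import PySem

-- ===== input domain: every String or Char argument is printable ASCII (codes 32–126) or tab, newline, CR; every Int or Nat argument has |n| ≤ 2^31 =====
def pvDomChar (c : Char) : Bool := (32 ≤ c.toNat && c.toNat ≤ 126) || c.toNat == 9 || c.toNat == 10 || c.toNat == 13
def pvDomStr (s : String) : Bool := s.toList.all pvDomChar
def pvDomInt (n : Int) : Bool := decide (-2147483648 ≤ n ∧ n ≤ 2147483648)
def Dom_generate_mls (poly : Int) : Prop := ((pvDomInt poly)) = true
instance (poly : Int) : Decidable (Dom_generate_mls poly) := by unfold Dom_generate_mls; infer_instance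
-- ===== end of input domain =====

-- B replaces A's bit-list shift register by a single integer state with a precomputed
-- feedback mask (output = state & 1, feedback = parity of state & mask); same results, no list churn.

-- ===== PORT A =====

-- while poly: poly >>= 1; l += 1   (guard `poly ≤ 0` totalizes the Python loop, which
-- diverges for negative poly — those inputs are outside Pre_; at poly = 0 it is exact)
def polyDegreeAux (poly : Int) (l : Int) : Int :=
  if poly ≤ 0 then l
  else polyDegreeAux (PySem.Int.floordiv poly 2) (l + 1)
termination_by poly.toNat
decreasing_by
  rw [PySem.Int.floordiv_eq_ediv_of_pos (by omega)]
  omega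

def poly_degree (poly : Int) : Int := polyDegreeAux poly (-1)

-- 2 ** poly_degree(poly) - 1; the exponent is ≥ 0 on every input A returns on
-- (a negative exponent makes Python produce a float and raise downstream — outside Pre_)
def mls_length_from_poly (poly : Int) : Int := 2 ^ (poly_degree poly).toNat - 1

-- the taps-collecting while loop
def tapsAux (poly : Int) (n : Int) (taps : List Int) : List Int :=
  if 1 < poly then
    tapsAux (PySem.Int.floordiv poly 2) (n + 1)
      (if PySem.Int.band poly 1 = 1 then taps ++ [n] else taps)
  else taps
termination_by poly.toNat
decreasing_by
  rw [PySem.Int.floordiv_eq_ediv_of_pos (by omega)]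
  omega

-- the main `for i in range(length)` loop; register indices hit by the taps are in
-- range on every input A returns on, so pyGetD's default 0 is never used there
def mlsLoop (taps : List Int) : Nat → List Int → List Int → List Int
  | 0, _register, mls => mls
  | k + 1, register, mls =>
    let feedback :=
      taps.foldl (fun fb tap => PySem.Int.bxor fb (PySem.List.pyGetD register tap 0))
        (PySem.List.pyGetD register 0 0)
    let register := register ++ [feedback]
    match PySem.List.pop? register 0 with
    | none => mls          -- IndexError (unreachable: register is nonempty here)
    | some (h, rest) => mlsLoop taps k rest (mls ++ [h])

def generate_mls (poly : Int) : List Int :=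
  let deg := poly_degree poly
  let length := mls_length_from_poly poly
  let register := List.replicate deg.toNat (1 : Int)
  let taps := tapsAux (PySem.Int.floordiv poly 2) 1 []
  mlsLoop taps length.toNat register []

-- ===== PORT B =====

-- the `for _ in range((1 << deg) - 1)` loop of Source B
def altLoop (mask : Int) (deg : Nat) : Nat → Int → List Int → List Int
  | 0, _state, mls => mls
  | k + 1, state, mls =>
    let mls := mls ++ [PySem.Int.band state 1]
    -- bin(x).count('1') = x.bit_count() for the nonnegative x reached here
    let fb := PySem.Int.bitCount (PySem.Int.band state mask) &&& 1
    altLoop mask deg k (PySem.Int.bor (state >>> (1 : Nat)) ((fb : Int) <<< (deg - 1))) mls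

def generate_mls_alt (poly : Int) : List Int :=
  let deg := PySem.Int.bitLength poly - 1   -- poly.bit_length() - 1 (≥ 0 for poly ≥ 1, i.e. under Pre_)
  let mask := PySem.Int.bor (PySem.Int.band poly (((1 : Int) <<< deg) - 1)) 1
  let state := ((1 : Int) <<< deg) - 1
  altLoop mask deg (((1 : Int) <<< deg) - 1).toNat state []

-- ===== PRECONDITION & SPEC =====

-- Python A diverges for poly < 0 (the degree loop never ends) and raises TypeError for
-- poly = 0 (2 ** -1 is a float, range() rejects it); Pre_ keeps exactly the returning inputs.
def Pre_generate_mls (poly : Int) : Prop := 1 ≤ poly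
instance (poly : Int) : Decidable (Pre_generate_mls poly) := by unfold Pre_generate_mls; infer_instance

def pvWitness_generate_mls : Int := 11

def Spec_generate_mls (poly : Int) (out : List Int) : Prop := out = generate_mls_alt poly
instance (poly : Int) (out : List Int) : Decidable (Spec_generate_mls poly out) := by unfold Spec_generate_mls; infer_instance

-- ===== CLAIM (what is proved, stated in full; the proofs are below) =====
def Claim_equal_generate_mls : Prop :=
  ∀ (poly : Int), Dom_generate_mls poly → Pre_generate_mls poly → Spec_generate_mls poly (generate_mls poly)

-- ===== LEMMAS AND PROOFS =====

-- bit i of s, as a Nat in {0,1}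
def bitv (s i : Nat) : Nat := (s >>> i) &&& 1

-- the register list A maintains, as a function of B's integer state
def toBits (deg s : Nat) : List Int := (List.range deg).map (fun i => ((bitv s i : Nat) : Int))

-- popcount at the Nat level (bridges to PySem.Int.bitCount)
def cnt : Nat → Nat := fun x => PySem.Int.bitCount (x : Int)

lemma bitv_eq (s i : Nat) : bitv s i = (s.testBit i).toNat := by
  rw [bitv, Nat.and_one_is_mod, Nat.shiftRight_eq_div_pow, Nat.testBit_eq_decide_div_mod_eq]
  rcases Nat.mod_two_eq_zero_or_one (s / 2 ^ i) with h | h <;> simp [h]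

lemma cnt_zero : cnt 0 = 0 := by
  simp [cnt, PySem.Int.bitCount_zero]

lemma cnt_rec (x : Nat) (hx : 0 < x) : cnt x = x % 2 + cnt (x / 2) := by
  simpa [cnt] using PySem.Int.bitCount_natCast (m := x) hx

lemma mod_two_eq_toNat_testBit (n : Nat) : n % 2 = (n.testBit 0).toNat := by
  rw [Nat.testBit_eq_decide_div_mod_eq]
  rcases Nat.mod_two_eq_zero_or_one n with h | h <;> simp [h]

lemma cnt_or_disjoint : ∀ x y : Nat, x &&& y = 0 → cnt (x ||| y) = cnt x + cnt y := by
  intro x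
  induction x using Nat.strong_induction_on with
  | _ x ih =>
    intro y hxy
    rcases Nat.eq_zero_or_pos x with hx | hx
    · simp [hx, cnt_zero]
    have h0 : (x.testBit 0 && y.testBit 0) = false := by
      have := congrArg (fun z => z.testBit 0) hxy
      simpa [Nat.testBit_and] using this
    have hdiv : (x ||| y) / 2 = x / 2 ||| y / 2 := by
      apply Nat.eq_of_testBit_eq
      intro i
      simp [Nat.testBit_div_two, Nat.testBit_or]
    have hdisj2 : (x / 2) &&& (y / 2) = 0 := by
      apply Nat.eq_of_testBit_eq
      intro i
      have := congrArg (fun z => z.testBit (i + 1)) hxy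
      simp [Nat.testBit_and, Nat.testBit_div_two] at this ⊢
      tauto
    have hmod : (x ||| y) % 2 = x % 2 + y % 2 := by
      rw [mod_two_eq_toNat_testBit, mod_two_eq_toNat_testBit x, mod_two_eq_toNat_testBit y,
        Nat.testBit_or]
      cases hx0 : x.testBit 0 <;> cases hy0 : y.testBit 0 <;> simp_all
    have hpos : 0 < x ||| y := Nat.lt_of_lt_of_le hx Nat.left_le_or
    rw [cnt_rec _ hpos, hdiv, hmod, ih (x / 2) (by omega) (y / 2) hdisj2, cnt_rec x hx]
    rcases Nat.eq_zero_or_pos y with hy | hy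
    · simp [hy, cnt_zero]
    · rw [cnt_rec y hy]; ring

lemma cnt_two_pow (t : Nat) : cnt (2 ^ t) = 1 := by
  induction t with
  | zero =>
    show cnt 1 = 1
    rw [cnt_rec 1 (by norm_num)]
    simp [cnt_zero]
  | succ t ih =>
    rw [cnt_rec _ (by positivity)]
    have h1 : 2 ^ (t + 1) % 2 = 0 := by
      simp [pow_succ, Nat.mul_mod]
    have h2 : 2 ^ (t + 1) / 2 = 2 ^ t := by
      rw [pow_succ, Nat.mul_div_cancel _ (by norm_num)]
    rw [h1, h2, ih]

lemma cnt_and_two_pow (s t : Nat) : cnt (s &&& 2 ^ t) = (s.testBit t).toNat := by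
  by_cases h : s.testBit t
  · have : s &&& 2 ^ t = 2 ^ t := by
      apply Nat.eq_of_testBit_eq
      intro i
      rw [Nat.testBit_and]
      by_cases hi : t = i
      · subst hi; simp [h]
      · simp [Nat.testBit_two_pow, hi]
    rw [this, cnt_two_pow, h]; rfl
  · have : s &&& 2 ^ t = 0 := by
      apply Nat.eq_of_testBit_eq
      intro i
      rw [Nat.testBit_and, Nat.zero_testBit]
      by_cases hi : t = i
      · subst hi; simp [h]
      · simp [Nat.testBit_two_pow, hi]
    simp [this, cnt_zero, h]

lemma parity_step (s m t : Nat) (hmt : ¬ m.testBit t) :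
    (cnt (s &&& m) % 2) ^^^ bitv s t = cnt (s &&& (m ||| 2 ^ t)) % 2 := by
  have hsplit : s &&& (m ||| 2 ^ t) = (s &&& m) ||| (s &&& 2 ^ t) := Nat.and_or_distrib_left ..
  have hdisj : (s &&& m) &&& (s &&& 2 ^ t) = 0 := by
    apply Nat.eq_of_testBit_eq
    intro i
    rw [Nat.testBit_and, Nat.testBit_and, Nat.testBit_and, Nat.zero_testBit]
    by_cases hi : t = i
    · subst hi; simp [hmt]
    · simp [Nat.testBit_two_pow, hi]
  rw [hsplit, cnt_or_disjoint _ _ hdisj, cnt_and_two_pow, bitv_eq]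
  rcases Nat.mod_two_eq_zero_or_one (cnt (s &&& m)) with h | h <;>
    cases hb : s.testBit t <;> simp [h, hb] <;> omega

lemma toBits_getElem (deg s i : Nat) (h : i < deg) :
    (toBits deg s)[i]'(by simp [toBits]; omega) = ((bitv s i : Nat) : Int) := by
  simp [toBits]

lemma toBits_length (deg s : Nat) : (toBits deg s).length = deg := by simp [toBits]

lemma fold_xor_eq_parity (s deg : Nat) :
    ∀ (tapsN : List Nat) (m : Nat), tapsN.Nodup → (∀ t ∈ tapsN, t < deg ∧ ¬ m.testBit t) →
    (tapsN.map (fun (t : Nat) => (t : Int))).foldl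
        (fun fb tap => PySem.Int.bxor fb (PySem.List.pyGetD (toBits deg s) tap 0))
        ((cnt (s &&& m) % 2 : Nat) : Int)
      = ((cnt (s &&& tapsN.foldl (fun acc t => acc ||| 1 <<< t) m) % 2 : Nat) : Int) := by
  intro tapsN
  induction tapsN with
  | nil => intro m _ _; simp
  | cons t rest ih =>
    intro m hnd hts
    have ht := hts t (by simp)
    rw [List.map_cons, List.foldl_cons]
    have hget : PySem.List.pyGetD (toBits deg s) (t : Int) 0 = ((bitv s t : Nat) : Int) := by
      rw [PySem.List.pyGetD_natCast, List.getD_eq_getElem _ _ (by rw [toBits_length]; exact ht.1)]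
      exact toBits_getElem deg s t ht.1
    rw [hget, PySem.Int.bxor_natCast, parity_step s m t ht.2]
    conv_rhs => rw [List.foldl_cons]
    rw [Nat.one_shiftLeft]
    exact ih (m ||| 2 ^ t) hnd.of_cons (by
      intro u hu
      refine ⟨(hts u (by simp [hu])).1, ?_⟩
      rw [Nat.testBit_or]
      have hut : u ≠ t := by
        intro h; subst h; exact (List.nodup_cons.mp hnd).1 hu
      simp [(hts u (by simp [hu])).2, Nat.testBit_two_pow, Ne.symm hut])

lemma foldl_or_testBit :
    ∀ (L : List Nat) (m i : Nat),
      (L.foldl (fun acc t => acc ||| 1 <<< t) m).testBit i = (m.testBit i || decide (i ∈ L)) := by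
  intro L
  induction L with
  | nil => simp
  | cons t rest ih =>
    intro m i
    rw [List.foldl_cons, ih, Nat.testBit_or, Nat.one_shiftLeft, Nat.testBit_two_pow]
    by_cases hti : t = i
    · subst hti; simp
    · simp [hti, Ne.symm hti]

lemma toBits_next (deg s fb : Nat) (hdeg : 1 ≤ deg) (hs : s < 2 ^ deg) (hfb : fb ≤ 1) :
    (toBits deg s).tail ++ [((fb : Nat) : Int)] = toBits deg ((s >>> 1) ||| (fb <<< (deg - 1))) := by
  apply List.ext_getElem
  · simp [toBits_length]; omega
  intro i h1 h2
  have hi : i < deg := by simpa [toBits_length] using h2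
  rw [toBits_getElem _ _ _ hi]
  have hlen : ((toBits deg s).tail).length = deg - 1 := by simp [toBits_length]
  by_cases hcase : i < deg - 1
  · rw [List.getElem_append_left (by omega)]
    have : (toBits deg s).tail[i]'(by omega) = ((bitv s (i + 1) : Nat) : Int) := by
      rw [List.getElem_tail]
      exact toBits_getElem deg s (i + 1) (by omega)
    rw [this]
    congr 1
    rw [bitv_eq, bitv_eq]
    congr 1
    rw [Nat.testBit_or, Nat.testBit_shiftRight, Nat.testBit_shiftLeft]
    simp [show ¬ (deg - 1 ≤ i) by omega, Nat.add_comm]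
  · have hieq : i = deg - 1 := by omega
    rw [List.getElem_append_right (by omega)]
    simp only [hlen, hieq]
    rw [List.getElem_singleton]
    congr 1
    rw [bitv_eq]
    rw [Nat.testBit_or, Nat.testBit_shiftRight, Nat.testBit_shiftLeft]
    have hstop : s.testBit (1 + (deg - 1)) = false := by
      apply Nat.testBit_eq_false_of_lt
      calc s < 2 ^ deg := hs
        _ ≤ 2 ^ (1 + (deg - 1)) := by apply Nat.pow_le_pow_right <;> omega
    rw [hstop]
    interval_cases fb <;> simp

lemma toBits_init (deg : Nat) : List.replicate deg (1 : Int) = toBits deg (2 ^ deg - 1) := by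
  apply List.ext_getElem
  · simp [toBits_length]
  intro i h1 h2
  have hi : i < deg := by simpa using h1
  rw [List.getElem_replicate, toBits_getElem _ _ _ hi, bitv_eq]
  rw [Nat.testBit_two_pow_sub_one]
  simp [hi]


-- the two loops agree step for step
lemma loops_eq (deg : Nat) (hdeg : 1 ≤ deg) (tapsN : List Nat) (hnd : tapsN.Nodup)
    (hts : ∀ t ∈ tapsN, 1 ≤ t ∧ t < deg) :
    ∀ (k s : Nat) (mls : List Int), s < 2 ^ deg →
      mlsLoop (tapsN.map (fun (t : Nat) => (t : Int))) k (toBits deg s) mls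
        = altLoop ((tapsN.foldl (fun acc t => acc ||| 1 <<< t) 1 : Nat) : Int) deg k (s : Int) mls := by
  intro k
  induction k with
  | zero => intro s mls _; rfl
  | succ k ih =>
    intro s mls hs
    have hM : ∀ t ∈ tapsN, t < deg ∧ ¬ (1 : Nat).testBit t := by
      intro t ht
      refine ⟨(hts t ht).2, ?_⟩
      have h1 : (1 : Nat) = 2 ^ 0 := rfl
      rw [h1, Nat.testBit_two_pow]
      have := (hts t ht).1
      simp; omega
    -- A's starting value of the fold is bit 0 of the state
    have hbit0 : bitv s 0 = s &&& 1 := by rw [bitv, Nat.shiftRight_zero]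
    have hcnt1 : cnt (s &&& 1) % 2 = s &&& 1 := by
      rw [Nat.and_one_is_mod]
      rcases Nat.mod_two_eq_zero_or_one s with h | h <;> rw [h]
      · simp [cnt_zero]
      · rw [cnt_rec 1 (by norm_num)]; simp [cnt_zero]
    have hstart : PySem.List.pyGetD (toBits deg s) 0 0 = ((cnt (s &&& 1) % 2 : Nat) : Int) := by
      rw [PySem.List.pyGetD_eq_getElem (toBits deg s) 0 (by norm_num)
        (by rw [toBits_length]; exact_mod_cast hdeg)]
      have h0 : ((0 : Int).toNat) = 0 := rfl
      simp only [h0]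
      rw [toBits_getElem deg s 0 (by omega), hbit0, hcnt1]
    have hfb := fold_xor_eq_parity s deg tapsN 1 hnd hM
    -- one step of A
    have hcons : toBits deg s = ((bitv s 0 : Nat) : Int) :: (toBits deg s).tail := by
      have hne : toBits deg s ≠ [] := by
        intro h
        have := toBits_length deg s
        rw [h] at this
        simp at this; omega
      conv_lhs => rw [(List.cons_head_tail hne).symm]
      congr 1
      rw [List.head_eq_getElem]
      exact toBits_getElem deg s 0 (by omega)
    set M := tapsN.foldl (fun acc t => acc ||| 1 <<< t) 1 with hMdef
    set fbN := cnt (s &&& M) % 2 with hfbN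
    have hfble : fbN ≤ 1 := by
      rw [hfbN]; omega
    have hstep_a :
        mlsLoop (tapsN.map (fun (t : Nat) => (t : Int))) (k + 1) (toBits deg s) mls
          = mlsLoop (tapsN.map (fun (t : Nat) => (t : Int))) k
              ((toBits deg s).tail ++ [((fbN : Nat) : Int)]) (mls ++ [((s &&& 1 : Nat) : Int)]) := by
      rw [mlsLoop]
      simp only [hstart, hfb, ← hMdef, ← hfbN]
      conv_lhs => rw [hcons]
      rw [List.cons_append, PySem.List.pop?_zero_cons]
      simp only [hbit0]
    -- one step of B
    have hsr : ((s : Int) >>> (1 : Nat)) = ((s >>> 1 : Nat) : Int) := by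
      simp [Int.natCast_shiftRight]
    have hband : PySem.Int.band (s : Int) 1 = ((s &&& 1 : Nat) : Int) := by
      exact_mod_cast PySem.Int.band_natCast s 1
    have hbandM : PySem.Int.band (s : Int) ((M : Nat) : Int) = ((s &&& M : Nat) : Int) :=
      PySem.Int.band_natCast s M
    have hsl : ((fbN : Nat) : Int) <<< (deg - 1) = ((fbN <<< (deg - 1) : Nat) : Int) := by
      rw [Int.shiftLeft_eq, Nat.shiftLeft_eq]
      push_cast
      ring
    have hstep_b :
        altLoop ((M : Nat) : Int) deg (k + 1) (s : Int) mls
          = altLoop ((M : Nat) : Int) deg k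
              (((s >>> 1) ||| (fbN <<< (deg - 1)) : Nat) : Int) (mls ++ [((s &&& 1 : Nat) : Int)]) := by
      rw [altLoop]
      simp only [hband, hbandM]
      have : PySem.Int.bitCount ((s &&& M : Nat) : Int) &&& 1 = fbN := by
        rw [hfbN, ← Nat.and_one_is_mod]; rfl
      rw [this, hsr, hsl, PySem.Int.bor_natCast]
    rw [hstep_a, hstep_b]
    -- new state stays below 2 ^ deg
    have hs1 : s >>> 1 < 2 ^ deg := by
      have : s >>> 1 ≤ s := by
        rw [Nat.shiftRight_eq_div_pow]
        exact Nat.div_le_self ..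
      omega
    have hs2 : fbN <<< (deg - 1) < 2 ^ deg := by
      rw [Nat.shiftLeft_eq]
      calc fbN * 2 ^ (deg - 1) ≤ 1 * 2 ^ (deg - 1) := by
            exact Nat.mul_le_mul_right _ hfble
        _ < 2 ^ deg := by
            rw [one_mul]
            exact Nat.pow_lt_pow_right (by norm_num) (by omega)
    rw [toBits_next deg s fbN hdeg hs hfble]
    exact ih _ _ (Nat.or_lt_two_pow hs1 hs2)

-- characterization of A's degree helper
lemma polyDegreeAux_eq (m : Nat) : ∀ l : Int, polyDegreeAux (m : Int) l = l + PySem.Int.bitLength (m : Int) := by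
  induction m using Nat.strong_induction_on with
  | _ m ih =>
    intro l
    rw [polyDegreeAux]
    rcases Nat.eq_zero_or_pos m with hm | hm
    · subst hm
      simp [PySem.Int.bitLength_zero]
    · rw [if_neg (by exact_mod_cast by omega),
        show ((2 : Int)) = ((2 : Nat) : Int) from rfl, PySem.Int.floordiv_natCast]
      rw [ih (m / 2) (by omega) (l + 1)]
      rw [PySem.Int.bitLength_natCast (m := m) hm]
      push_cast
      ring

-- characterization of A's taps loop
lemma tapsAux_eq (p deg : Nat) (hlo : 2 ^ deg ≤ p) (hhi : p < 2 ^ (deg + 1)) :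
    ∀ (k n : Nat) (acc : List Int), n + k = deg →
      tapsAux ((p >>> n : Nat) : Int) (n : Int) acc
        = acc ++ ((List.range' n k).filter p.testBit).map (fun (t : Nat) => (t : Int)) := by
  intro k
  induction k with
  | zero =>
    intro n acc hn
    have hd : p >>> n = 1 := by
      rw [Nat.shiftRight_eq_div_pow]
      have hn' : n = deg := by omega
      rw [hn']
      have h2 : p < 2 ^ deg * 2 := by rw [← pow_succ]; exact hhi
      exact Nat.div_eq_of_lt_le (by omega) (by omega)
    rw [tapsAux, hd]
    rw [if_neg (by norm_num)]
    simp
  | succ k ih =>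
    intro n acc hn
    have hpow : 0 < 2 ^ n := Nat.pow_pos (by norm_num)
    have hge : 2 ^ (deg - n) ≤ p >>> n := by
      rw [Nat.shiftRight_eq_div_pow, Nat.le_div_iff_mul_le hpow, ← pow_add]
      have : deg - n + n = deg := by omega
      rw [this]; exact hlo
    have h2le : 2 ≤ p >>> n := by
      have : (2 : Nat) ^ 1 ≤ 2 ^ (deg - n) := Nat.pow_le_pow_right (by norm_num) (by omega)
      simpa using le_trans this hge
    rw [tapsAux, if_pos (by exact_mod_cast by omega)]
    have hdiv : PySem.Int.floordiv ((p >>> n : Nat) : Int) 2 = ((p >>> (n + 1) : Nat) : Int) := by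
      rw [show ((2 : Int)) = ((2 : Nat) : Int) from rfl, PySem.Int.floordiv_natCast]
      simp [Nat.shiftRight_succ]
    have hband : PySem.Int.band ((p >>> n : Nat) : Int) 1 = (((p >>> n) &&& 1 : Nat) : Int) := by
      exact_mod_cast PySem.Int.band_natCast (p >>> n) 1
    have htb : ((p >>> n) &&& 1 = 1) ↔ p.testBit n := by
      rw [Nat.and_one_is_mod, Nat.testBit_eq_decide_div_mod_eq, Nat.shiftRight_eq_div_pow]
      simp
    have hrange : List.range' n (k + 1) = n :: List.range' (n + 1) k := List.range'_succ ..
    rw [hdiv, hband]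
    have hcast : ((n : Int) + 1) = (((n + 1 : Nat)) : Int) := by push_cast; ring
    rw [hcast]
    by_cases hb : p.testBit n
    · rw [if_pos (by exact_mod_cast htb.mpr hb)]
      rw [ih (n + 1) (acc ++ [(n : Int)]) (by omega)]
      rw [hrange, List.filter_cons, if_pos (by simpa using hb)]
      simp
    · rw [if_neg (by
        intro hcontra
        exact hb (htb.mp (by exact_mod_cast hcontra)))]
      rw [ih (n + 1) acc (by omega)]
      rw [hrange, List.filter_cons, if_neg (by simpa using hb)]

-- the tap mask equals B's precomputed mask
lemma mask_eq (p deg : Nat) (hdeg : 1 ≤ deg) :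
    (((List.range' 1 (deg - 1)).filter p.testBit).foldl (fun acc t => acc ||| 1 <<< t) 1)
      = (p &&& (2 ^ deg - 1)) ||| 1 := by
  apply Nat.eq_of_testBit_eq
  intro i
  rw [foldl_or_testBit, Nat.testBit_or, Nat.testBit_and, Nat.testBit_two_pow_sub_one]
  have hone : (1 : Nat).testBit i = decide (i = 0) := by
    rcases i with _ | j
    · simp
    · have : (1 : Nat).testBit (j + 1) = false := by
        rw [Nat.testBit_eq_decide_div_mod_eq]
        have : 1 / 2 ^ (j + 1) = 0 := Nat.div_eq_of_lt (Nat.one_lt_two_pow (by omega))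
        simp [this]
      simp [this]
  rw [hone]
  have hmem : i ∈ (List.range' 1 (deg - 1)).filter p.testBit ↔ (1 ≤ i ∧ i < deg ∧ p.testBit i) := by
    rw [List.mem_filter, List.mem_range'_1]
    constructor
    · rintro ⟨⟨h1, h2⟩, h3⟩; exact ⟨h1, by omega, h3⟩
    · rintro ⟨h1, h2, h3⟩; exact ⟨⟨h1, by omega⟩, h3⟩
  by_cases h0 : i = 0
  · subst h0; simp
  · simp only [hmem]
    by_cases hp : p.testBit i <;> by_cases hlt : i < deg <;> simp [hp, hlt, h0] <;> omega

lemma div_two_eq_shiftRight_one (p : Nat) : p / 2 = p >>> 1 := by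
  simp [Nat.shiftRight_succ, Nat.shiftRight_zero]

-- ===== VERDICT (by name: the statement is the Claim_ definition above) =====
theorem generate_mls_spec : Claim_equal_generate_mls := by
  unfold Claim_equal_generate_mls Spec_generate_mls Pre_generate_mls
  intro poly _hdom hpre
  obtain ⟨p, rfl⟩ : ∃ p : Nat, poly = (p : Int) := ⟨poly.toNat, by omega⟩
  have hp1 : 1 ≤ p := by exact_mod_cast hpre
  set L := PySem.Int.bitLength ((p : Nat) : Int) with hLdef
  have habs : ((p : Nat) : Int).natAbs = p := Int.natAbs_natCast p
  have hL1 : 1 ≤ L := by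
    rcases Nat.eq_zero_or_pos L with h | h
    · exfalso
      have hb := PySem.Int.lt_two_pow_bitLength ((p : Nat) : Int)
      rw [← hLdef, h] at hb
      simp [habs] at hb
      omega
    · exact h
  set deg := L - 1 with hdegdef
  have hlo : 2 ^ deg ≤ p := by
    have := PySem.Int.two_pow_bitLength_le ((p : Nat) : Int) (by exact_mod_cast by omega)
    rwa [← hLdef, habs] at this
  have hhi : p < 2 ^ (deg + 1) := by
    have := PySem.Int.lt_two_pow_bitLength ((p : Nat) : Int)
    rw [← hLdef, habs] at this
    have hde : deg + 1 = L := by omega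
    rwa [hde]
  have hpowpos : 1 ≤ 2 ^ deg := Nat.one_le_two_pow
  -- A's degree
  have hdegA : poly_degree ((p : Nat) : Int) = (-1 : Int) + L := by
    rw [poly_degree, polyDegreeAux_eq p (-1), hLdef]
  have hdegA' : (poly_degree ((p : Nat) : Int)).toNat = deg := by
    rw [hdegA]; omega
  -- A's length
  have hlenA : (mls_length_from_poly ((p : Nat) : Int)).toNat = 2 ^ deg - 1 := by
    rw [mls_length_from_poly, hdegA']
    have hc : ((2 : Int)) ^ deg = (((2 : Nat) ^ deg : Nat) : Int) := by push_cast; ring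
    rw [hc]
    omega
  -- B's numbers
  have hshl : ((1 : Int) <<< deg) = (((2 : Nat) ^ deg : Nat) : Int) := by
    rw [Int.shiftLeft_eq]; push_cast; ring
  have hshl1 : ((1 : Int) <<< deg) - 1 = (((2 : Nat) ^ deg - 1 : Nat) : Int) := by
    rw [hshl]; push_cast [hpowpos]; ring
  have hcount : (((1 : Int) <<< deg) - 1).toNat = 2 ^ deg - 1 := by
    rw [hshl1]; omega
  simp only [generate_mls, generate_mls_alt, ← hLdef, ← hdegdef, hdegA', hlenA, hcount, hshl1]
  rcases Nat.eq_zero_or_pos deg with hdeg0 | hdeg1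
  · -- degree 0: both loops run 0 times
    rw [hdeg0]
    rfl
  · -- A's taps
    have hfd : PySem.Int.floordiv ((p : Nat) : Int) 2 = ((p >>> 1 : Nat) : Int) := by
      rw [show ((2 : Int)) = ((2 : Nat) : Int) from rfl, PySem.Int.floordiv_natCast,
        div_two_eq_shiftRight_one]
    have htaps : tapsAux (PySem.Int.floordiv ((p : Nat) : Int) 2) 1 []
        = ((List.range' 1 (deg - 1)).filter p.testBit).map (fun (t : Nat) => (t : Int)) := by
      rw [hfd]
      have := tapsAux_eq p deg hlo hhi (deg - 1) 1 [] (by omega)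
      simpa using this
    set T := (List.range' 1 (deg - 1)).filter p.testBit with hTdef
    have hnd : T.Nodup := (List.nodup_range' ..).filter _
    have hts : ∀ t ∈ T, 1 ≤ t ∧ t < deg := by
      intro t ht
      rw [hTdef, List.mem_filter, List.mem_range'_1] at ht
      exact ⟨ht.1.1, by omega⟩
    have hreg : List.replicate deg (1 : Int) = toBits deg (2 ^ deg - 1) := toBits_init deg
    have hloop := loops_eq deg hdeg1 T hnd hts (2 ^ deg - 1) (2 ^ deg - 1) [] (by omega)
    rw [htaps, hreg, hloop]
    have hM := mask_eq p deg hdeg1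
    rw [← hTdef] at hM
    rw [hM, Int.toNat_natCast]
    congr 1
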